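-- pv_equiv track=rewrite | github.com/crbikebike/magpie | bin/watcher.py | _remove_yaml_entry_by_filename
-- ===== SOURCE A (Python) =====
-- def _remove_yaml_entry_by_filename(content: str, filename: str) -> str:
--     """Remove a YAML entry from content by matching its file field.
--
--     Args:
--         content: The YAML content.
--         filename: The filename to match and remove.
--
--     Returns:
--         Content with the matching entry removed.
--     """
--     lines = content.splitlines(keepends=True)
--     entry_start = None
--     file_line_found = False
--
--     for i, line in enumerate(lines):
--         stripped = line.strip()
--         if stripped.startswith("- title:"):
--             if file_line_found:
--                 return "".join(lines[:entry_start]) + "".join(lines[i:])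
--             entry_start = i
--             file_line_found = False
--         if entry_start is not None and f"file: {filename}" in line:
--             file_line_found = True
--
--     if file_line_found and entry_start is not None:
--         return "".join(lines[:entry_start])
--
--     return content
-- ===== SOURCE B (Python) =====
-- def _remove_yaml_entry_by_filename(content: str, filename: str) -> str:
--     """Remove the first YAML entry whose block contains the file field.
--
--     Groups the lines into a preamble plus '- title:'-delimited blocks first,
--     then removes the first block containing 'file: <filename>'.
--     """
--     lines = content.splitlines(keepends=True)
--
--     def is_title(line):
--         return line.strip().startswith("- title:")
--
--     k = 0
--     while k < len(lines) and not is_title(lines[k]):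
--         k += 1
--     preamble = lines[:k]
--     rest = lines[k:]
--
--     blocks = []
--     while rest:
--         j = 1
--         while j < len(rest) and not is_title(rest[j]):
--             j += 1
--         blocks.append(rest[:j])
--         rest = rest[j:]
--
--     target = f"file: {filename}"
--     before = []
--     for block in blocks:
--         if any(target in line for line in block):
--             return "".join(preamble) + "".join("".join(b) for b in before + blocks[len(before) + 1:])
--         before.append(block)
--     return content
-- ===== Notes on version B (the rewrite author's own statement) =====
-- stated objective: alternative
-- what changed: B first partitions the lines into a preamble plus '- title:'-delimited blocks, then searches the blocks for the first one containing 'file: <filename>' and rejoins all others, instead of A's single pass that interleaves block-start tracking with the match flag and early returns.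
import Mathlib
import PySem

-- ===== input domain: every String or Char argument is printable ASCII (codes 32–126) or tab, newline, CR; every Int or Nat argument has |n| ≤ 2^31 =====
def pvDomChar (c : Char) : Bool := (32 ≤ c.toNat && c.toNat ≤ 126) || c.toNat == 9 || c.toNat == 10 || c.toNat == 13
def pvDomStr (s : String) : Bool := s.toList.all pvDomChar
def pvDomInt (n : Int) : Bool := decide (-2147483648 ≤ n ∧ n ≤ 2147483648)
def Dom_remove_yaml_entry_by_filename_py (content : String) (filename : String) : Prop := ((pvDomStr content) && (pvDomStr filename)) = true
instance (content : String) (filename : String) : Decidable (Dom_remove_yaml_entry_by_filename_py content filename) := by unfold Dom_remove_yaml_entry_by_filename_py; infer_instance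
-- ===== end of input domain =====

-- B groups the lines into preamble + '- title:'-delimited blocks and then removes the first
-- block containing 'file: <filename>' (objective: alternative decomposition, not faster).

-- shared helper: content.splitlines(keepends=True), ported by hand on List Char.
-- Exact on the stated domain, where the only line-break characters are '\n', '\r' and "\r\n".
def pvSplitKE : List Char → List (List Char)
  | [] => []
  | c :: r =>
    if c = '\n' then ['\n'] :: pvSplitKE r
    else if c = '\r' then
      match r with
      | '\n' :: r' => ['\r', '\n'] :: pvSplitKE r'
      | r2 => ['\r'] :: pvSplitKE r2
    else
      match pvSplitKE r with
      | [] => [[c]]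
      | l :: ls => (c :: l) :: ls

-- shared helper: line.strip().startswith("- title:")
def pvIsTitle (l : List Char) : Bool :=
  PySem.Chars.startswith (PySem.Chars.strip l) ("- title:".toList)

-- shared helper: target in line
def pvHasT (t l : List Char) : Bool := PySem.Chars.isIn t l

-- ===== PORT A =====
-- the for-loop of A: state (i, entry_start, file_line_found); early returns inline
def pvALoop (content : String) (lines : List (List Char)) (t : List Char) :
    List (List Char) → Nat → Option Nat → Bool → String
  | [], _i, es, found =>
    -- after the loop: if file_line_found and entry_start is not None: return "".join(lines[:entry_start])
    if found && es.isSome then String.ofList (List.flatten (lines.take (es.getD 0))) else content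
  | line :: rest, i, es, found =>
    if pvIsTitle line then
      if found then
        String.ofList (List.flatten (lines.take (es.getD 0)) ++ List.flatten (lines.drop i))
      else
        -- entry_start = i; file_line_found = False; then the second if (entry_start is now some i)
        pvALoop content lines t rest (i + 1) (some i) (pvHasT t line)
    else
      pvALoop content lines t rest (i + 1) es (if es.isSome && pvHasT t line then true else found)

def remove_yaml_entry_by_filename_py (content : String) (filename : String) : String :=
  let lines := pvSplitKE content.toList
  let t := ("file: " ++ filename).toList
  pvALoop content lines t lines 0 none false

-- ===== PORT B =====
-- the second while-loop of B: split the post-preamble lines into '- title:'-led blocks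
def pvBBlocks : List (List Char) → List (List (List Char))
  | [] => []
  | l :: rest =>
    (l :: rest.takeWhile (fun x => !pvIsTitle x)) :: pvBBlocks (rest.dropWhile (fun x => !pvIsTitle x))
  termination_by bs => bs.length
  decreasing_by simpa using Nat.lt_succ_of_le (List.length_dropWhile_le _ _)

-- the final for-loop of B: find the first matching block; 'before' collects blocks already passed
def pvBSearch (content : String) (pre : List (List Char)) (t : List Char) :
    List (List (List Char)) → List (List (List Char)) → String
  | _before, [] => content
  | before, b :: bs =>
    if b.any (pvHasT t) then
      String.ofList (List.flatten pre ++ List.flatten ((before ++ bs).map List.flatten))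
    else
      pvBSearch content pre t (before ++ [b]) bs

def remove_yaml_entry_by_filename_py_alt (content : String) (filename : String) : String :=
  let lines := pvSplitKE content.toList
  let pre := lines.takeWhile (fun l => !pvIsTitle l)
  let blocks := pvBBlocks (lines.dropWhile (fun l => !pvIsTitle l))
  pvBSearch content pre (("file: " ++ filename).toList) [] blocks

-- ===== PRECONDITION & SPEC =====
def Spec_remove_yaml_entry_by_filename_py (content : String) (filename : String) (out : String) : Prop := out = remove_yaml_entry_by_filename_py_alt content filename
instance (content : String) (filename : String) (out : String) : Decidable (Spec_remove_yaml_entry_by_filename_py content filename out) := by unfold Spec_remove_yaml_entry_by_filename_py; infer_instance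

-- ===== CLAIM (what is proved, stated in full; the proofs are below) =====
def Claim_equal_remove_yaml_entry_by_filename_py : Prop := ∀ (content : String) (filename : String), Dom_remove_yaml_entry_by_filename_py content filename → Spec_remove_yaml_entry_by_filename_py content filename (remove_yaml_entry_by_filename_py content filename)

-- ===== LEMMAS AND PROOFS =====

-- proof-side specification: one-line automaton with A's 'found' flag resolved eagerly;
-- es = none while still in the preamble, es = some s inside the block starting at line s
def pvSpec (content : String) (lines : List (List Char)) (t : List Char) :
    List (List Char) → Nat → Option Nat → String
  | [], _i, _es => content
  | l :: r, i, es =>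
    if pvIsTitle l then
      if pvHasT t l then
        String.ofList (List.flatten (lines.take i) ++
          List.flatten (lines.drop (i + 1 + (r.takeWhile (fun x => !pvIsTitle x)).length)))
      else pvSpec content lines t r (i + 1) (some i)
    else
      match es with
      | some s =>
        if pvHasT t l then
          String.ofList (List.flatten (lines.take s) ++
            List.flatten (lines.drop (i + 1 + (r.takeWhile (fun x => !pvIsTitle x)).length)))
        else pvSpec content lines t r (i + 1) (some s)
      | none => pvSpec content lines t r (i + 1) none

theorem pv_drop_step {α : Type} {lines r : List α} {l : α} {i : Nat}
    (h : lines.drop i = l :: r) : lines.drop (i + 1) = r := by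
  have h2 : (lines.drop i).drop 1 = lines.drop (i + 1) := List.drop_drop
  rw [← h2, h]; rfl

theorem pv_drop_add {α : Type} {lines r : List α} {i : Nat} (k : Nat)
    (h : lines.drop i = r) : lines.drop (i + k) = r.drop k := by
  have h2 : (lines.drop i).drop k = lines.drop (i + k) := List.drop_drop
  rw [← h2, h]

theorem pv_takeWhile_take {α : Type} (p : α → Bool) (r : List α) :
    r.take (r.takeWhile p).length = r.takeWhile p :=
  (List.prefix_iff_eq_take.mp (List.takeWhile_prefix p)).symm

theorem pv_dropWhile_drop {α : Type} (p : α → Bool) (r : List α) :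
    r.dropWhile p = r.drop (r.takeWhile p).length := by
  induction r with
  | nil => rfl
  | cons a r ih =>
    by_cases h : p a
    · simp [h, ih]
    · simp [h]

theorem pv_dropWhile_boundary (L : List (List Char)) :
    L.dropWhile (fun x => !pvIsTitle x) = [] ∨
      ∃ l r, L.dropWhile (fun x => !pvIsTitle x) = l :: r ∧ pvIsTitle l = true := by
  induction L with
  | nil => exact Or.inl rfl
  | cons a L ih =>
    by_cases h : pvIsTitle a
    · exact Or.inr ⟨a, L, by simp [h], h⟩
    · simpa [List.dropWhile_cons, h] using ih

theorem pv_take_flatten {lines r : List (List Char)} {l : List Char} {j : Nat}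
    (h : lines.drop j = l :: r) (k : Nat) :
    List.flatten (lines.take (j + 1 + (r.take k).length)) =
      List.flatten (lines.take j) ++ l ++ List.flatten (r.take k) := by
  have e : j + 1 + (r.take k).length = j + (1 + (r.take k).length) := by omega
  rw [e, List.take_add, h]
  have : (l :: r).take (1 + (r.take k).length) = l :: r.take (r.take k).length := by
    simp [Nat.add_comm]
  rw [this]
  have : r.take (r.take k).length = r.take k :=
    (List.prefix_iff_eq_take.mp (List.take_prefix k r)).symm
  rw [this]
  simp [List.flatten_append]

-- A-side: once found = true (inside a block), A joins up to the block start and from the next title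
theorem pvALoop_found (content : String) (lines : List (List Char)) (t : List Char) :
    ∀ (rest : List (List Char)) (i s : Nat), lines.drop i = rest →
      pvALoop content lines t rest i (some s) true =
        String.ofList (List.flatten (lines.take s) ++
          List.flatten (lines.drop (i + (rest.takeWhile (fun x => !pvIsTitle x)).length))) := by
  intro rest
  induction rest with
  | nil => intro i s h; simp [pvALoop, h]
  | cons l r ih =>
    intro i s h
    by_cases hl : pvIsTitle l
    · simp [pvALoop, hl]
    · have h2 := pv_drop_step h
      have hrec := ih (i + 1) s h2
      have e : i + 1 + (r.takeWhile (fun x => !pvIsTitle x)).length =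
          i + ((l :: r).takeWhile (fun x => !pvIsTitle x)).length := by
        simp [hl]
        omega
      rw [e] at hrec
      have hstep : pvALoop content lines t (l :: r) i (some s) true =
          pvALoop content lines t r (i + 1) (some s) true := by
        simp [pvALoop, hl, ite_self]
      rw [hstep, hrec]

-- A-side: A's loop equals the automaton pvSpec
theorem pvALoop_eq_spec (content : String) (lines : List (List Char)) (t : List Char) :
    ∀ (rest : List (List Char)) (i : Nat) (es : Option Nat), lines.drop i = rest →
      pvALoop content lines t rest i es false = pvSpec content lines t rest i es := by
  intro rest
  induction rest with
  | nil => intro i es h; cases es <;> simp [pvALoop, pvSpec]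
  | cons l r ih =>
    intro i es h
    have h2 := pv_drop_step h
    by_cases hl : pvIsTitle l
    · by_cases hm : pvHasT t l
      · have hfound := pvALoop_found content lines t r (i + 1) i h2
        simp [pvALoop, pvSpec, hl, hm, hfound]
      · simp only [pvALoop, pvSpec, hl, hm, if_true]
        simp [ih (i + 1) (some i) h2]
    · cases es with
      | none =>
        simp only [pvALoop, pvSpec, hl]
        simp [ih (i + 1) none h2]
      | some s =>
        by_cases hm : pvHasT t l
        · have hfound := pvALoop_found content lines t r (i + 1) s h2
          simp [pvALoop, pvSpec, hl, hm, hfound]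
        · simp only [pvALoop, pvSpec, hl, hm]
          simp [ih (i + 1) (some s) h2]

-- pvSpec walk: inside a block, skip the non-title remainder of the current block
theorem pvSpec_mid (content : String) (lines : List (List Char)) (t : List Char) :
    ∀ (r : List (List Char)) (j s : Nat),
      pvSpec content lines t r j (some s) =
        if (r.takeWhile (fun x => !pvIsTitle x)).any (pvHasT t) then
          String.ofList (List.flatten (lines.take s) ++
            List.flatten (lines.drop (j + (r.takeWhile (fun x => !pvIsTitle x)).length)))
        else pvSpec content lines t (r.dropWhile (fun x => !pvIsTitle x))
          (j + (r.takeWhile (fun x => !pvIsTitle x)).length) none := by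
  intro r
  induction r with
  | nil => intro j s; simp [pvSpec]
  | cons l r ih =>
    intro j s
    by_cases hl : pvIsTitle l
    · simp [pvSpec, hl]
    · by_cases hm : pvHasT t l
      · simp only [pvSpec, hl, hm, if_true, List.takeWhile_cons,
          Bool.not_false, List.any_cons, Bool.true_or]
        simp
        congr 3
        omega
      · have := ih (j + 1) s
        simp only [pvSpec, hl, hm, List.takeWhile_cons, List.dropWhile_cons, Bool.not_false,
          if_true, List.any_cons, Bool.false_or]
        simp only [Bool.false_eq_true, if_false, this]
        have e : j + 1 + (r.takeWhile (fun x => !pvIsTitle x)).length =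
            j + ((r.takeWhile (fun x => !pvIsTitle x)).length + 1) := by omega
        by_cases hany : (r.takeWhile (fun x => !pvIsTitle x)).any (pvHasT t)
        · simp [hany, e, List.length_cons]
        · simp [hany, e, List.length_cons]

-- pvSpec walk: the preamble is skipped
theorem pvSpec_pre (content : String) (lines : List (List Char)) (t : List Char) :
    ∀ (L : List (List Char)) (j : Nat),
      pvSpec content lines t L j none =
        pvSpec content lines t (L.dropWhile (fun x => !pvIsTitle x))
          (j + (L.takeWhile (fun x => !pvIsTitle x)).length) none := by
  intro L
  induction L with
  | nil => intro j; simp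
  | cons l r ih =>
    intro j
    by_cases hl : pvIsTitle l
    · simp [hl]
    · have := ih (j + 1)
      simp only [pvSpec, hl, List.takeWhile_cons, List.dropWhile_cons, Bool.not_false, if_true,
        Bool.false_eq_true, if_false, this]
      congr 1
      simp [List.length_cons]
      omega

-- flattening the blocks gives back the lines
theorem pvBBlocks_flatten : ∀ (R : List (List Char)), (pvBBlocks R).flatten = R := by
  intro R
  induction R using pvBBlocks.induct with
  | case1 => simp [pvBBlocks]
  | case2 l rest ih =>
    rw [pvBBlocks]
    simp only [List.flatten_cons, ih]
    simp [List.takeWhile_append_dropWhile]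

-- B-side: the block search equals the automaton at a block boundary
theorem pvBSearch_eq_spec (content : String) (lines : List (List Char)) (t : List Char) :
    ∀ (R : List (List Char)) (j : Nat) (before : List (List (List Char))) (pre : List (List Char)),
      lines.drop j = R →
      (R = [] ∨ ∃ l r, R = l :: r ∧ pvIsTitle l = true) →
      List.flatten pre ++ List.flatten (before.map List.flatten) = List.flatten (lines.take j) →
      pvBSearch content pre t before (pvBBlocks R) = pvSpec content lines t R j none := by
  intro R
  induction R using pvBBlocks.induct with
  | case1 =>
    intro j before pre _ _ _
    simp [pvBBlocks, pvBSearch, pvSpec]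
  | case2 l rest ih =>
    intro j before pre hdrop hbnd hinv
    have hl : pvIsTitle l = true := by
      rcases hbnd with h | ⟨l', r', he, ht⟩
      · exact absurd h (by simp)
      · rw [List.cons.injEq] at he; rw [he.1]; exact ht
    have hdr1 : lines.drop (j + 1) = rest := pv_drop_step hdrop
    set p : List Char → Bool := fun x => !pvIsTitle x with hp
    set c : List (List Char) := rest.takeWhile p with hc
    set r2 : List (List Char) := rest.dropWhile p with hr2
    have hdrop2 : lines.drop (j + 1 + c.length) = r2 := by
      rw [pv_drop_add c.length hdr1, hr2, hc, ← pv_dropWhile_drop]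
    have htake : List.flatten (lines.take (j + 1 + c.length)) =
        List.flatten (lines.take j) ++ l ++ List.flatten c := by
      have := pv_take_flatten hdrop c.length
      rw [pv_takeWhile_take] at this
      simpa [pv_takeWhile_take] using this
    have hflat_blocks : List.flatten ((pvBBlocks r2).map List.flatten) = r2.flatten := by
      rw [← List.flatten_flatten, pvBBlocks_flatten]
    rw [pvBBlocks]
    rw [pvBSearch]
    have hspec : pvSpec content lines t (l :: rest) j none =
        if pvHasT t l then
          String.ofList (List.flatten (lines.take j) ++
            List.flatten (lines.drop (j + 1 + c.length)))
        else pvSpec content lines t rest (j + 1) (some j) := by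
      simp [pvSpec, hl, hc, hp]
    rw [hspec]
    by_cases hml : pvHasT t l
    · have : (l :: c).any (pvHasT t) = true := by simp [hml]
      rw [this, if_pos rfl, if_pos hml]
      rw [hdrop2]
      congr 1
      simp only [List.map_append, List.flatten_append, ← List.append_assoc, hinv]
      rw [← List.flatten_flatten, pvBBlocks_flatten]
    · have hany : (l :: c).any (pvHasT t) = (c.any (pvHasT t)) := by simp [hml]
      rw [hany, if_neg hml]
      rw [pvSpec_mid content lines t rest (j + 1) j]
      have e : j + 1 + c.length = j + 1 + (rest.takeWhile p).length := by rw [hc]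
      by_cases hmc : c.any (pvHasT t) = true
      · rw [if_pos hmc, if_pos (by rw [← hc]; exact hmc)]
        rw [hdrop2]
        congr 1
        simp only [List.map_append, List.flatten_append, ← List.append_assoc, hinv]
        rw [← List.flatten_flatten, pvBBlocks_flatten]
      · rw [if_neg (by simp [hmc]), if_neg (by rw [← hc]; simp [hmc])]
        have hbnd2 : r2 = [] ∨ ∃ l' r', r2 = l' :: r' ∧ pvIsTitle l' = true :=
          pv_dropWhile_boundary rest
        have hinv2 : List.flatten pre ++
            List.flatten ((before ++ [l :: c]).map List.flatten) =
            List.flatten (lines.take (j + 1 + c.length)) := by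
          rw [htake]
          simp only [List.map_append, List.flatten_append, ← List.append_assoc, hinv]
          simp
        have := ih (j + 1 + c.length) (before ++ [l :: c]) pre hdrop2 hbnd2 hinv2
        rw [this]

-- ===== VERDICT (by name: the statement is the Claim_ definition above) =====
theorem remove_yaml_entry_by_filename_py_spec : Claim_equal_remove_yaml_entry_by_filename_py := by
  intro content filename _dom
  unfold Spec_remove_yaml_entry_by_filename_py
  have hA : remove_yaml_entry_by_filename_py content filename =
      pvALoop content (pvSplitKE content.toList) (("file: " ++ filename).toList)
        (pvSplitKE content.toList) 0 none false := rfl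
  have hB : remove_yaml_entry_by_filename_py_alt content filename =
      pvBSearch content ((pvSplitKE content.toList).takeWhile (fun l => !pvIsTitle l))
        (("file: " ++ filename).toList) []
        (pvBBlocks ((pvSplitKE content.toList).dropWhile (fun l => !pvIsTitle l))) := rfl
  rw [hA, hB]
  set lines := pvSplitKE content.toList with hlines
  set t := ("file: " ++ filename).toList with ht
  have hdropw : lines.drop (lines.takeWhile (fun l => !pvIsTitle l)).length =
      lines.dropWhile (fun l => !pvIsTitle l) := (pv_dropWhile_drop _ lines).symm
  have hpre : List.flatten (lines.takeWhile (fun l => !pvIsTitle l)) ++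
      List.flatten (([] : List (List (List Char))).map List.flatten) =
      List.flatten (lines.take (lines.takeWhile (fun l => !pvIsTitle l)).length) := by
    rw [pv_takeWhile_take]; simp
  rw [pvALoop_eq_spec content lines t lines 0 none (by simp)]
  rw [pvSpec_pre content lines t lines 0]
  simp only [Nat.zero_add]
  rw [← pvBSearch_eq_spec content lines t (lines.dropWhile (fun l => !pvIsTitle l))
      (lines.takeWhile (fun l => !pvIsTitle l)).length []
      (lines.takeWhile (fun l => !pvIsTitle l)) hdropw (pv_dropWhile_boundary lines) hpre]
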